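-- pv_equiv track=rewrite | github.com/miliar/Code_Jam_Webscraper | solutions_python/solutions_year13_round0_nr2/1347.py | solve
-- ===== SOURCE A (Python) =====
-- def solve(lawn, dim):
--     """ Check if this lawn config is possible.
--
--     We need to check if there is a possible path
--     out of the lawn at each square. We will examine
--     the lawn row by row. For each row, we find the
--     max, and examine each square in that row that is
--     less than the max.
--
--     Notice that if a square is less than it's rowmax
--     there is no path out left/right. Therefore, we
--     simply must check if there is an up/down path
--     possible.
--     """
--     rows = lawn
--     cols = [list(x) for x in zip(*lawn)]
--
--     for i in range(0, dim[0]):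
--         tall = max(rows[i])
--
--         for j in  range(0, dim[1]):
--             if rows[i][j] < tall:
--                 path = sum(x <= rows[i][j] for x in cols[j])
--
--                 if path < dim[0]:
--                     return "NO"
--
--     return "YES"
-- ===== SOURCE B (Python) =====
-- def solve(lawn, dim):
--     """Feasibility check: precompute row and column maxima once, then test
--     each cell against both in a single pass."""
--     if dim[0] <= 0:
--         return "YES"  # no rows to check
--     row_max = [max(r) for r in lawn]
--     col_max = [max(c) for c in zip(*lawn)]
--     for row, rmax in zip(lawn, row_max):
--         for v, cmax in zip(row, col_max):
--             if v < rmax and v < cmax: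
--                 return "NO"
--     return "YES"
-- ===== Notes on version B (the rewrite author's own statement) =====
-- stated objective: alternative
-- what changed: B precomputes all row maxima and all column maxima once and checks every cell against both in a single pass (after a trivial early YES when dim[0] <= 0 asks for no rows), instead of A's nested scan that recounts an entire column (sum over the column) for every cell below its row maximum; it trades A's per-cell counting for two precomputed maxima tables.
-- outside the precondition, e.g. on solve([[2, 1], [2, 2]], [2, 1]): A returns 'YES', B returns 'NO'
import Mathlib
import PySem

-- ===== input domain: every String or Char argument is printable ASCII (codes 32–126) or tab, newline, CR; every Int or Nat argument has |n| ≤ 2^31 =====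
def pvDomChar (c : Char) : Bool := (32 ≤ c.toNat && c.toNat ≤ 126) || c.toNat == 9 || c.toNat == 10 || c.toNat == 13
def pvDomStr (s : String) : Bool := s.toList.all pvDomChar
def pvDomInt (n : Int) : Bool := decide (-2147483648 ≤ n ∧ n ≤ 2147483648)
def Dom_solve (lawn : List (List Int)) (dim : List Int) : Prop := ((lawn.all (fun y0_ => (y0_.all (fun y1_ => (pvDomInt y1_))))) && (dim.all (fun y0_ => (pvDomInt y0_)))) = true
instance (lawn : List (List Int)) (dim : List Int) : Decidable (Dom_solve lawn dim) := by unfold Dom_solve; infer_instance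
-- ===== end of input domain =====

-- B precomputes row and column maxima once and checks each cell against both in one pass,
-- instead of A's per-cell column recount. Equivalence is claimed on the instances Pre_ admits.

-- ===== PORT A =====
-- zip(*lawn): the list of columns, truncated to the shortest row (Python's zip).
def pyZip (ls : List (List Int)) : List (List Int) :=
  match ls with
  | [] => []
  | r :: rs =>
      (List.range (rs.foldl (fun m t => min m t.length) r.length)).map
        (fun j => (r :: rs).map (fun t => t.getD j 0))

-- inner loop 'for j in range(0, dim[1])' with its early 'return "NO"' (true = returned NO)
def solveInnerA (cols : List (List Int)) (R : Int) (row : List Int) (tall : Int) :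
    List Int → Bool
  | [] => false
  | j :: js =>
      let v := PySem.List.pyGetD row j 0
      if v < tall then
        let path : Int := ((PySem.List.pyGetD cols j []).map
          (fun x => if x ≤ v then (1 : Int) else 0)).sum
        if path < R then true else solveInnerA cols R row tall js
      else solveInnerA cols R row tall js

-- outer loop 'for i in range(0, dim[0])'
def solveOuterA (rows cols : List (List Int)) (R C : Int) : List Int → String
  | [] => "YES"
  | i :: is =>
      let row := PySem.List.pyGetD rows i []
      let tall := (PySem.List.max? row (fun x => x)).getD 0
      if solveInnerA cols R row tall (PySem.List.pyRange 0 C 1) then "NO"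
      else solveOuterA rows cols R C is

def solve (lawn : List (List Int)) (dim : List Int) : String :=
  let rows := lawn
  let cols := pyZip lawn
  solveOuterA rows cols (PySem.List.pyGetD dim 0 0) (PySem.List.pyGetD dim 1 0)
    (PySem.List.pyRange 0 (PySem.List.pyGetD dim 0 0) 1)

-- ===== PORT B =====
-- inner loop 'for v, cmax in zip(row, col_max)'
def solveInnerB (rmax : Int) : List (Int × Int) → Bool
  | [] => false
  | p :: ps => if p.1 < rmax ∧ p.1 < p.2 then true else solveInnerB rmax ps

-- outer loop 'for row, rmax in zip(lawn, row_max)'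
def solveOuterB (colMax : List Int) : List (List Int × Int) → String
  | [] => "YES"
  | q :: qs =>
      if solveInnerB q.2 (q.1.zip colMax) then "NO" else solveOuterB colMax qs

def solve_alt (lawn : List (List Int)) (dim : List Int) : String :=
  if PySem.List.pyGetD dim 0 0 ≤ 0 then "YES" else
  let rowMax := lawn.map (fun r => (PySem.List.max? r (fun x => x)).getD 0)
  let colMax := (pyZip lawn).map (fun c => (PySem.List.max? c (fun x => x)).getD 0)
  solveOuterB colMax (lawn.zip rowMax)

-- ===== PRECONDITION & SPEC =====
-- Pre_ admits the trivial instances (dim[0] <= 0: A's loop runs zero times) and the well-formed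
-- ones (dim = [number of rows, row length], lawn rectangular and nonempty, no empty rows).
-- It excludes inputs where dim[0] > 0 but dim does not describe lawn's shape: there A raises
-- (IndexError/ValueError) or scans only an accidental portion of the grid.
def Pre_solve (lawn : List (List Int)) (dim : List Int) : Prop :=
  (dim ≠ [] ∧ dim.headD 0 ≤ 0) ∨
  (dim = [(lawn.length : Int), ((lawn.headD []).length : Int)] ∧
    (∀ r ∈ lawn, r.length = (lawn.headD []).length) ∧
    lawn ≠ [] ∧ lawn.headD [] ≠ [])
instance (lawn : List (List Int)) (dim : List Int) : Decidable (Pre_solve lawn dim) := by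
  unfold Pre_solve; infer_instance

def pvWitness_solve : List (List Int) × List Int := ([[1, 2], [2, 1]], [2, 2])

def Spec_solve (lawn : List (List Int)) (dim : List Int) (out : String) : Prop :=
  out = solve_alt lawn dim
instance (lawn : List (List Int)) (dim : List Int) (out : String) :
    Decidable (Spec_solve lawn dim out) := by unfold Spec_solve; infer_instance

-- ===== CLAIM (what is proved, stated in full; the proofs are below) =====
def Claim_equal_solve : Prop := ∀ (lawn : List (List Int)) (dim : List Int),
  Dom_solve lawn dim → Pre_solve lawn dim → Spec_solve lawn dim (solve lawn dim)

-- ===== LEMMAS AND PROOFS =====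

-- max(l) for a nonempty list, with default (Pre_ guarantees nonemptiness where it is used)
def mxI (l : List Int) : Int := (PySem.List.max? l (fun x => x)).getD 0

-- the common characterisation both programs are reduced to
def Pcond (lawn : List (List Int)) (C : Nat) : Prop :=
  ∃ i < lawn.length, ∃ j < C,
    (lawn.getD i []).getD j 0 < mxI (lawn.getD i []) ∧
    (lawn.getD i []).getD j 0 < mxI (lawn.map (fun t => t.getD j 0))

-- loop shapes
lemma innerA_any (cols : List (List Int)) (R : Int) (row : List Int) (tall : Int)
    (js : List Int) : solveInnerA cols R row tall js = js.any (fun j =>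
      decide (PySem.List.pyGetD row j 0 < tall ∧
        ((PySem.List.pyGetD cols j []).map
          (fun x => if x ≤ PySem.List.pyGetD row j 0 then (1 : Int) else 0)).sum < R)) := by
  induction js with
  | nil => rfl
  | cons j js ih =>
    simp only [solveInnerA, List.any_cons, ih]
    by_cases h1 : PySem.List.pyGetD row j 0 < tall <;>
      by_cases h2 : ((PySem.List.pyGetD cols j []).map
          (fun x => if x ≤ PySem.List.pyGetD row j 0 then (1 : Int) else 0)).sum < R <;>
      simp [h1, h2]

lemma outerA_eq (rows cols : List (List Int)) (R C : Int) (is : List Int) :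
    solveOuterA rows cols R C is =
      if is.any (fun i => solveInnerA cols R (PySem.List.pyGetD rows i [])
          ((PySem.List.max? (PySem.List.pyGetD rows i []) (fun x => x)).getD 0)
          (PySem.List.pyRange 0 C 1)) then "NO" else "YES" := by
  induction is with
  | nil => rfl
  | cons i is ih =>
    simp only [solveOuterA, List.any_cons, ih]
    by_cases h : solveInnerA cols R (PySem.List.pyGetD rows i [])
        ((PySem.List.max? (PySem.List.pyGetD rows i []) (fun x => x)).getD 0)
        (PySem.List.pyRange 0 C 1) <;> simp [h]

lemma innerB_any (rmax : Int) (ps : List (Int × Int)) :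
    solveInnerB rmax ps = ps.any (fun p => decide (p.1 < rmax ∧ p.1 < p.2)) := by
  induction ps with
  | nil => rfl
  | cons p ps ih =>
    simp only [solveInnerB, List.any_cons, ih]
    by_cases h : p.1 < rmax ∧ p.1 < p.2 <;> simp [h]

lemma outerB_eq (colMax : List Int) (qs : List (List Int × Int)) :
    solveOuterB colMax qs =
      if qs.any (fun q => solveInnerB q.2 (q.1.zip colMax)) then "NO" else "YES" := by
  induction qs with
  | nil => rfl
  | cons q qs ih =>
    simp only [solveOuterB, List.any_cons, ih]
    by_cases h : solveInnerB q.2 (q.1.zip colMax) = true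
    · simp [h]
    · rw [if_neg h]
      simp only [Bool.not_eq_true] at h
      simp only [h, Bool.false_or]

-- max facts
lemma lt_mxI_iff (l : List Int) (hl : l ≠ []) (v : Int) :
    v < mxI l ↔ ∃ x ∈ l, v < x := by
  obtain ⟨x, t, rfl⟩ := List.exists_cons_of_ne_nil hl
  simp only [mxI, PySem.List.max?_id_cons, Option.getD_some]
  constructor
  · intro h
    rcases PySem.List.foldl_max_mem t x with h' | h'
    · exact ⟨x, List.mem_cons_self, h' ▸ h⟩
    · exact ⟨t.foldl max x, List.mem_cons_of_mem _ h', h⟩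
  · rintro ⟨y, hy, hvy⟩
    rcases List.mem_cons.mp hy with rfl | hy
    · exact lt_of_lt_of_le hvy (PySem.List.le_foldl_max t y).1
    · exact lt_of_lt_of_le hvy ((PySem.List.le_foldl_max t x).2 y hy)

-- count sum bridge
lemma path_lt_iff (col : List Int) (v : Int) :
    ((col.map (fun x => if x ≤ v then (1 : Int) else 0)).sum < (col.length : Int)) ↔
      ∃ x ∈ col, v < x := by
  have h := PySem.List.sum_map_ite_one_zero (fun x => decide (x ≤ v)) col
  simp only [decide_eq_true_eq] at h
  rw [h]
  have hle := List.countP_le_length (l := col) (p := fun x => decide (x ≤ v))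
  constructor
  · intro hlt
    by_contra hall
    simp only [not_exists, not_and, not_lt] at hall
    have : List.countP (fun x => decide (x ≤ v)) col = col.length :=
      List.countP_eq_length.mpr (fun a ha => by simp [hall a ha])
    omega
  · rintro ⟨x, hx, hvx⟩
    have : List.countP (fun x => decide (x ≤ v)) col ≠ col.length := by
      intro hcc
      have := List.countP_eq_length.mp hcc x hx
      simp at this
      omega
    omega

-- pyZip on a rectangular lawn
lemma foldl_min_const {C : Nat} (rs : List (List Int)) (h : ∀ t ∈ rs, t.length = C) :
    rs.foldl (fun m t => min m t.length) C = C := by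
  induction rs with
  | nil => rfl
  | cons t ts ih =>
    simp only [List.foldl_cons, h t (List.mem_cons_self), min_self]
    exact ih (fun u hu => h u (List.mem_cons_of_mem _ hu))

lemma pyZip_rect (lawn : List (List Int)) (C : Nat) (hne : lawn ≠ [])
    (hrect : ∀ r ∈ lawn, r.length = C) :
    pyZip lawn = (List.range C).map (fun j => lawn.map (fun t => t.getD j 0)) := by
  obtain ⟨r, rs, rfl⟩ := List.exists_cons_of_ne_nil hne
  have hr : r.length = C := hrect r (List.mem_cons_self)
  simp only [pyZip, hr]
  rw [foldl_min_const rs (fun t ht => hrect t (List.mem_cons_of_mem _ ht))]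
lemma mxI_fold : (fun r : List Int => (PySem.List.max? r (fun x => x)).getD 0) = mxI := rfl

lemma ite_str_iff (b : Bool) : ((if b = true then "NO" else "YES") : String) = "NO" ↔ b = true := by
  cases b <;> simp

lemma any_pyRange_iff (n : Nat) (f : Int → Bool) :
    ((PySem.List.pyRange 0 (n : Int) 1).any f = true) ↔ ∃ k, k < n ∧ f (k : Int) = true := by
  rw [List.any_eq_true]
  constructor
  · rintro ⟨i, hi, hf⟩
    rw [PySem.List.mem_pyRange_one] at hi
    refine ⟨i.toNat, by omega, ?_⟩
    rwa [Int.toNat_of_nonneg hi.1]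
  · rintro ⟨k, hk, hf⟩
    exact ⟨(k : Int), by rw [PySem.List.mem_pyRange_one]; omega, hf⟩

lemma any_mem_getElem {α : Type} (l : List α) (p : α → Bool) :
    l.any p = true ↔ ∃ k, ∃ _h : k < l.length, p l[k] = true := by
  rw [List.any_eq_true]
  constructor
  · rintro ⟨a, ha, hp⟩
    obtain ⟨k, hk, rfl⟩ := List.mem_iff_getElem.mp ha
    exact ⟨k, hk, hp⟩
  · rintro ⟨k, hk, hp⟩
    exact ⟨l[k], List.getElem_mem hk, hp⟩

lemma any_zip_iff {α β : Type} (xs : List α) (ys : List β) (p : α × β → Bool) :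
    ((xs.zip ys).any p = true) ↔
      ∃ k, ∃ _h1 : k < xs.length, ∃ _h2 : k < ys.length, p (xs[k], ys[k]) = true := by
  rw [any_mem_getElem]
  constructor
  · rintro ⟨k, hk, hp⟩
    have h1 : k < xs.length := by simp [List.length_zip] at hk; omega
    have h2 : k < ys.length := by simp [List.length_zip] at hk; omega
    rw [List.getElem_zip] at hp
    exact ⟨k, h1, h2, hp⟩
  · rintro ⟨k, h1, h2, hp⟩
    refine ⟨k, by simp [List.length_zip]; omega, ?_⟩
    rw [List.getElem_zip]
    exact hp

lemma cell_iff (lawn : List (List Int)) (C : Nat)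
    (hrect : ∀ r ∈ lawn, r.length = C) (i' j' : Nat)
    (hi' : i' < lawn.length) (hj' : j' < C) :
    (PySem.List.pyGetD (lawn.getD i' []) (j' : Int) 0 < mxI (lawn.getD i' []) ∧
      ((PySem.List.pyGetD (pyZip lawn) (j' : Int) []).map
        (fun x => if x ≤ PySem.List.pyGetD (lawn.getD i' []) (j' : Int) 0 then (1 : Int) else 0)).sum
          < (lawn.length : Int)) ↔
    ((lawn.getD i' []).getD j' 0 < mxI (lawn.getD i' []) ∧
      (lawn.getD i' []).getD j' 0 < mxI (lawn.map (fun t => t.getD j' 0))) := by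
  have hne : lawn ≠ [] := by intro h; subst h; simp at hi'
  have hcol : PySem.List.pyGetD (pyZip lawn) (j' : Int) [] = lawn.map (fun t => t.getD j' 0) := by
    rw [PySem.List.pyGetD_natCast, pyZip_rect lawn C hne hrect,
      List.getD_eq_getElem _ _ (by simpa using hj')]
    simp
  rw [PySem.List.pyGetD_natCast, hcol]
  refine and_congr Iff.rfl ?_
  have hcne : lawn.map (fun t => t.getD j' 0) ≠ [] := by simp [hne]
  have hlen : (lawn.map (fun t => t.getD j' 0)).length = lawn.length := by simp
  rw [← hlen, path_lt_iff, lt_mxI_iff _ hcne]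
lemma A_cond_iff (lawn : List (List Int)) (C : Nat)
    (hrect : ∀ r ∈ lawn, r.length = C) :
    (((PySem.List.pyRange 0 (lawn.length : Int) 1).any (fun i =>
        solveInnerA (pyZip lawn) (lawn.length : Int) (PySem.List.pyGetD lawn i [])
          ((PySem.List.max? (PySem.List.pyGetD lawn i []) (fun x => x)).getD 0)
          (PySem.List.pyRange 0 (C : Int) 1))) = true) ↔ Pcond lawn C := by
  rw [any_pyRange_iff]
  unfold Pcond
  constructor
  · rintro ⟨i', hi', hf⟩
    simp only [PySem.List.pyGetD_natCast] at hf
    rw [innerA_any, any_pyRange_iff] at hf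
    obtain ⟨j', hj', hd⟩ := hf
    simp only [decide_eq_true_eq] at hd
    exact ⟨i', hi', j', hj', (cell_iff lawn C hrect i' j' hi' hj').mp hd⟩
  · rintro ⟨i', hi', j', hj', hP⟩
    refine ⟨i', hi', ?_⟩
    simp only [PySem.List.pyGetD_natCast]
    rw [innerA_any, any_pyRange_iff]
    refine ⟨j', hj', ?_⟩
    simp only [decide_eq_true_eq]
    exact (cell_iff lawn C hrect i' j' hi' hj').mpr hP

lemma B_cond_iff (lawn : List (List Int)) (C : Nat)
    (hrect : ∀ r ∈ lawn, r.length = C) :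
    (((lawn.zip (lawn.map mxI)).any (fun q =>
        solveInnerB q.2 (q.1.zip ((pyZip lawn).map mxI)))) = true) ↔ Pcond lawn C := by
  have hzm : lawn.zip (lawn.map mxI) = lawn.map (fun r => (r, mxI r)) := by
    have h := List.zip_map' (f := id) (g := mxI) (l := lawn)
    rw [List.map_id] at h
    simpa only [id_eq] using h
  rw [hzm, List.any_map]
  rw [any_mem_getElem]
  unfold Pcond
  constructor
  · rintro ⟨i', hi', hf⟩
    simp only [Function.comp] at hf
    have hne : lawn ≠ [] := by intro h; subst h; simp at hi'
    rw [innerB_any, any_zip_iff] at hf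
    obtain ⟨j', hj1, hj2, hd⟩ := hf
    simp only [List.getElem_map] at hj2 hd ⊢
    simp only [pyZip_rect lawn C hne hrect] at hj2 hd
    simp only [List.length_map, List.length_range] at hj2
    simp only [List.getElem_map, List.getElem_range] at hd
    simp only [decide_eq_true_eq] at hd
    refine ⟨i', hi', j', hj2, ?_⟩
    rw [List.getD_eq_getElem _ _ hi', List.getD_eq_getElem _ _ (by rw [hrect _ (List.getElem_mem hi')]; exact hj2)]
    exact hd
  · rintro ⟨i', hi', j', hj', hP⟩
    have hne : lawn ≠ [] := by intro h; subst h; simp at hi'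
    refine ⟨i', hi', ?_⟩
    simp only [Function.comp]
    rw [innerB_any, any_zip_iff]
    have hrl : lawn[i'].length = C := hrect _ (List.getElem_mem hi')
    refine ⟨j', by omega, ?_, ?_⟩
    · simp only [pyZip_rect lawn C hne hrect]; simpa using hj'
    · simp only [decide_eq_true_eq]
      rw [List.getD_eq_getElem _ _ hi', List.getD_eq_getElem _ _ (by omega : j' < lawn[i'].length)] at hP
      constructor
      · exact hP.1
      · simp only [pyZip_rect lawn C hne hrect, List.getElem_map, List.getElem_range]
        exact hP.2

lemma A_values (lawn : List (List Int)) (dim : List Int) :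
    solve lawn dim = "NO" ∨ solve lawn dim = "YES" := by
  simp only [solve]
  rw [outerA_eq]
  split_ifs <;> simp

lemma B_values (lawn : List (List Int)) (dim : List Int) :
    solve_alt lawn dim = "NO" ∨ solve_alt lawn dim = "YES" := by
  simp only [solve_alt]
  rw [outerB_eq]
  split_ifs <;> simp

lemma A_NO_iff (lawn : List (List Int)) (dim : List Int)
    (hdim : dim = [(lawn.length : Int), ((lawn.headD []).length : Int)])
    (hrect : ∀ r ∈ lawn, r.length = (lawn.headD []).length) :
    solve lawn dim = "NO" ↔ Pcond lawn (lawn.headD []).length := by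
  subst hdim
  simp only [solve]
  have h0 : PySem.List.pyGetD [(lawn.length : Int), ((lawn.headD []).length : Int)] 0 0
      = (lawn.length : Int) := rfl
  have h1 : PySem.List.pyGetD [(lawn.length : Int), ((lawn.headD []).length : Int)] 1 0
      = ((lawn.headD []).length : Int) := rfl
  rw [h0, h1, outerA_eq, ite_str_iff]
  exact A_cond_iff lawn (lawn.headD []).length hrect

lemma B_NO_iff (lawn : List (List Int)) (dim : List Int)
    (hdim : dim = [(lawn.length : Int), ((lawn.headD []).length : Int)])
    (hrect : ∀ r ∈ lawn, r.length = (lawn.headD []).length)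
    (hne : lawn ≠ []) :
    solve_alt lawn dim = "NO" ↔ Pcond lawn (lawn.headD []).length := by
  subst hdim
  simp only [solve_alt]
  have hg : ¬ (PySem.List.pyGetD
      [(lawn.length : Int), ((lawn.headD []).length : Int)] 0 0 ≤ 0) := by
    have h0 : PySem.List.pyGetD
        [(lawn.length : Int), ((lawn.headD []).length : Int)] 0 0 = (lawn.length : Int) := rfl
    rw [h0]
    have : 0 < lawn.length := List.length_pos_iff.mpr hne
    omega
  rw [if_neg hg, mxI_fold, outerB_eq, ite_str_iff]
  exact B_cond_iff lawn (lawn.headD []).length hrect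

theorem solve_spec : Claim_equal_solve := by
  unfold Claim_equal_solve
  intro lawn dim _hdom hPre
  unfold Spec_solve
  rcases hPre with ⟨hdne, hd0⟩ | ⟨hdim, hrect, hne, -⟩
  · -- trivial region: dim[0] ≤ 0, both return "YES"
    obtain ⟨d, rest, rfl⟩ := List.exists_cons_of_ne_nil hdne
    simp only [List.headD_cons] at hd0
    have hg : PySem.List.pyGetD (d :: rest) 0 0 = d := PySem.List.pyGetD_zero_cons _ _ _
    have hA : solve lawn (d :: rest) = "YES" := by
      simp only [solve]
      rw [hg, PySem.List.pyRange_one_eq_nil hd0]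
      rfl
    have hB : solve_alt lawn (d :: rest) = "YES" := by
      simp only [solve_alt]
      rw [hg, if_pos hd0]
    rw [hA, hB]
  · by_cases h : Pcond lawn (lawn.headD []).length
    · rw [(A_NO_iff lawn dim hdim hrect).mpr h, (B_NO_iff lawn dim hdim hrect hne).mpr h]
    · rcases A_values lawn dim with h1 | h1
      · exact absurd ((A_NO_iff lawn dim hdim hrect).mp h1) h
      · rcases B_values lawn dim with h2 | h2
        · exact absurd ((B_NO_iff lawn dim hdim hrect hne).mp h2) h
        · rw [h1, h2]
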